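-- pv_equiv track=rewrite | github.com/pypi-data/pypi-mirror-48 | packages/tamarai/tamarai-6.6.6-py3-none-any.whl/tamarai/code_a.py | lang
-- ===== SOURCE A (Python) =====
-- def lang(string, added="b", letters=("a", "e", "i", "o", "u")):
--     out = ""
--     for letter in string:
--         if letter in letters:
--             out += letter + added + letter
--         else:
--             out += letter
--     return out
-- ===== SOURCE B (Python) =====
-- def lang(string, added="b", letters=("a", "e", "i", "o", "u")):
--     table = {ord(v): v + added + v for v in letters if len(v) == 1}
--     return string.translate(table)
-- ===== Notes on version B (the rewrite author's own statement) =====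
-- stated objective: idiomatic
-- what changed: Builds a codepoint->replacement translation table once and returns string.translate(table) in one table-driven pass, instead of an explicit per-character if/else loop with string concatenation.
import Mathlib
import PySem

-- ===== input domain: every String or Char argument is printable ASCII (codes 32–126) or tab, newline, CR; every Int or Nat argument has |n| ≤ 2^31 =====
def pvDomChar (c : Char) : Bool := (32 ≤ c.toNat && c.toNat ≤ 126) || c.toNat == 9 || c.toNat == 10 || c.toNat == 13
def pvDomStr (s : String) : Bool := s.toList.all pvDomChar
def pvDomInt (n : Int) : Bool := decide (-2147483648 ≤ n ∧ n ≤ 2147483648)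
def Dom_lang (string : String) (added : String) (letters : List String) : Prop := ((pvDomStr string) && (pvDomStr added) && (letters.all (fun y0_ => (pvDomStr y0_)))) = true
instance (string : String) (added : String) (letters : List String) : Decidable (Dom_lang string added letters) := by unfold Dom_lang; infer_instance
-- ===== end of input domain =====

-- B builds a codepoint->replacement translation table once and does one table-driven
-- str.translate pass, instead of A's per-character if/else loop with repeated
-- concatenation (objective: idiomatic).

-- ===== PORT A =====
def lang (string : String) (added : String) (letters : List String) : String :=
  string.toList.foldl
    (fun out letter =>
      if String.singleton letter ∈ letters then
        out ++ (String.singleton letter ++ added ++ String.singleton letter)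
      else
        out ++ String.singleton letter) ""

-- ===== PORT B =====
-- table = {ord(v): v + added + v for v in letters if len(v) == 1}
-- ord(v) on a known single-character v is ported as (v.toList.headD ' ').toNat
def langTable (added : String) (letters : List String) : PySem.Dict Int String :=
  (letters.filter (fun v => v.toList.length == 1)).foldl
    (fun d v => d.insert ((v.toList.headD ' ').toNat : Int) (v ++ added ++ v))
    PySem.Dict.empty

-- string.translate(table): each char is replaced by its table entry (itself if absent)
def lang_alt (string : String) (added : String) (letters : List String) : String :=
  let table := langTable added letters
  PySem.Str.join "" (string.toList.map (fun c => table.getD (c.toNat : Int) (String.singleton c)))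

-- ===== PRECONDITION & SPEC =====
def Spec_lang (string : String) (added : String) (letters : List String) (out : String) : Prop := out = lang_alt string added letters
instance (string : String) (added : String) (letters : List String) (out : String) : Decidable (Spec_lang string added letters out) := by unfold Spec_lang; infer_instance

-- ===== CLAIM (what is proved, stated in full; the proofs are below) =====
def Claim_equal_lang : Prop := ∀ (string : String) (added : String) (letters : List String), Dom_lang string added letters → Spec_lang string added letters (lang string added letters)

-- ===== LEMMAS AND PROOFS =====

lemma char_toNat_inj (a b : Char) (h : a.toNat = b.toNat) : a = b := by
  apply Char.ext; unfold Char.toNat at h; exact UInt32.toNat_inj.mp h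

-- a string is the singleton of c iff it has length 1 with head c
lemma single_iff (v : String) (c : Char) :
    (v.toList.length = 1 ∧ v.toList.headD ' ' = c) ↔ v = String.singleton c := by
  constructor
  · rintro ⟨h1, h2⟩
    cases hv : v.toList with
    | nil => simp [hv] at h1
    | cons x xs =>
      cases xs with
      | nil =>
        have hvx : v = String.ofList [x] := by
          have := congrArg String.ofList hv
          simpa using this
        simp [hv] at h2
        subst h2
        simpa [String.singleton] using hvx
      | cons y ys => simp [hv] at h1
  · rintro rfl; simp

-- lookup into the table-building fold: the value at key c.toNat
lemma table_getD (added : String) (letters : List String) (d : PySem.Dict Int String) (c : Char) :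
    ((letters.filter (fun v => v.toList.length == 1)).foldl
        (fun d v => d.insert ((v.toList.headD ' ').toNat : Int) (v ++ added ++ v)) d).getD
      (c.toNat : Int) (String.singleton c)
    = if String.singleton c ∈ letters then
        String.singleton c ++ added ++ String.singleton c
      else d.getD (c.toNat : Int) (String.singleton c) := by
  induction letters generalizing d with
  | nil => simp
  | cons v rest ih =>
    by_cases hlen : v.toList.length = 1
    · rw [List.filter_cons_of_pos (by simpa using hlen)]
      simp only [List.foldl_cons]
      rw [ih]
      by_cases hmem : String.singleton c ∈ rest
      · simp [hmem]
      · by_cases hv : v = String.singleton c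
        · have hk : ((v.toList.headD ' ').toNat : Int) = (c.toNat : Int) := by
            rw [hv]; simp
          rw [hk]
          simp [hmem, hv, PySem.Dict.getD_insert_self]
        · have hne : (c.toNat : Int) ≠ ((v.toList.headD ' ').toNat : Int) := by
            intro h
            have hchar : v.toList.headD ' ' = c :=
              char_toNat_inj _ _ (by omega)
            exact hv ((single_iff v c).1 ⟨hlen, hchar⟩)
          rw [PySem.Dict.getD_insert, if_neg hne]
          simp [hmem, Ne.symm hv]
    · rw [List.filter_cons_of_neg (by simpa using hlen)]
      have hv : v ≠ String.singleton c := by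
        intro h; subst h; simp at hlen
      rw [ih]
      simp [Ne.symm hv]

-- join "" distributes over cons
lemma join_nil_cons (x : String) (xs : List String) :
    PySem.Str.join "" (x :: xs) = x ++ PySem.Str.join "" xs := by
  simp only [PySem.Str.join, PySem.Chars.join, List.intercalate, List.map_cons]
  apply String.ext
  cases xs <;> simp

-- A's accumulator fold equals acc ++ the joined map
lemma fold_app (g : Char → String) (l : List Char) (acc : String) :
    l.foldl (fun out c => out ++ g c) acc = acc ++ PySem.Str.join "" (l.map g) := by
  induction l generalizing acc with
  | nil =>
    apply String.ext
    simp [PySem.Str.join, PySem.Chars.join, List.intercalate]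
  | cons c cs ih =>
    simp only [List.foldl_cons, List.map_cons]
    rw [ih, join_nil_cons, String.append_assoc]

-- ===== VERDICT (by name: the statement is the Claim_ definition above) =====
theorem lang_spec : Claim_equal_lang := by
  intro string added letters _
  unfold Spec_lang lang lang_alt
  have hfold :
      string.toList.foldl
        (fun out letter =>
          if String.singleton letter ∈ letters then
            out ++ (String.singleton letter ++ added ++ String.singleton letter)
          else out ++ String.singleton letter) ""
      = string.toList.foldl
          (fun out letter =>
            out ++ (if String.singleton letter ∈ letters then
                      String.singleton letter ++ added ++ String.singleton letter
                    else String.singleton letter)) "" := by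
    apply PySem.List.foldl_congr_mem
    intro out c _
    split <;> rfl
  rw [hfold, fold_app]
  have hmap : ∀ c : Char,
      (langTable added letters).getD (c.toNat : Int) (String.singleton c)
      = (if String.singleton c ∈ letters then
           String.singleton c ++ added ++ String.singleton c
         else String.singleton c) := by
    intro c
    unfold langTable
    rw [table_getD]
    simp
  simp only [hmap]
  apply String.ext
  simp
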